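-- pv_equiv track=rewrite | github.com/daniel-reich/ubiquitous-fiesta | LhMkMu46rG8EweYf7_20.py | sort_by_letter
-- ===== SOURCE A (Python) =====
-- def sort_by_letter(lst):
--     if len(lst) == 0:
--         return []
--     myans = []
--     for i in range(26):
--         for item in lst:
--             if chr(i+97) in item:
--                 myans.append(item)
--                 break
--     return myans
-- ===== SOURCE B (Python) =====
-- def sort_by_letter(lst):
--     first = {}
--     for item in lst:
--         for c in item:
--             if c not in first:
--                 first[c] = item
--     out = []
--     for i in range(26):
--         c = chr(i + 97)
--         if c in first:
--             out.append(first[c])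
--     return out
-- ===== Notes on version B (the rewrite author's own statement) =====
-- stated objective: faster
-- what changed: Replaced A's 26 full-list scans (one linear search per letter) with a single pass over the items building a char->first-item dict, followed by one 26-letter output pass over the dict.
import Mathlib
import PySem

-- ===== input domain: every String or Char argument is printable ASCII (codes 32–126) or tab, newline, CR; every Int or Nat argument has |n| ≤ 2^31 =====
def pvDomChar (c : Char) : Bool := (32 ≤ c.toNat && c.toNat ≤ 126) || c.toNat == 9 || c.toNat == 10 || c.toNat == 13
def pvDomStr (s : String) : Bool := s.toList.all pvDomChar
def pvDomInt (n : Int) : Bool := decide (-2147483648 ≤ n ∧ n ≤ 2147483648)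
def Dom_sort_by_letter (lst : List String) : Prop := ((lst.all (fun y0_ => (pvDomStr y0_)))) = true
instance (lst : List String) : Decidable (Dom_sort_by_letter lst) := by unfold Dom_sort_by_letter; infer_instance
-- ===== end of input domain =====

-- B replaces A's 26 full-list scans with one indexing pass building a letter→first-item dict, then a 26-step output pass (simpler/faster single pass over the data).

-- ===== PORT A =====
def sort_by_letter (lst : List String) : List String :=
  if lst.length == 0 then [] else
    (List.range 26).foldl (fun myans i =>
      match lst.find? (fun item => item.toList.contains (Char.ofNat (i + 97))) with
      | some item => myans ++ [item]
      | none => myans) []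

-- ===== PORT B =====
def pvFirstTable (lst : List String) : PySem.Dict Char String :=
  lst.foldl (fun d item =>
    item.toList.foldl (fun d c => if d.contains c then d else d.insert c item) d)
    PySem.Dict.empty

def sort_by_letter_alt (lst : List String) : List String :=
  (List.range 26).foldl (fun out i =>
    match (pvFirstTable lst).get? (Char.ofNat (i + 97)) with
    | some v => out ++ [v]
    | none => out) []

-- ===== PRECONDITION & SPEC =====
def Spec_sort_by_letter (lst : List String) (out : List String) : Prop := out = sort_by_letter_alt lst
instance (lst : List String) (out : List String) : Decidable (Spec_sort_by_letter lst out) := by unfold Spec_sort_by_letter; infer_instance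

-- ===== CLAIM (what is proved, stated in full; the proofs are below) =====
def Claim_equal_sort_by_letter : Prop := ∀ (lst : List String), Dom_sort_by_letter lst → Spec_sort_by_letter lst (sort_by_letter lst)

-- ===== LEMMAS AND PROOFS =====

-- inner item loop: a key already present is kept; otherwise the item is recorded iff it contains c
theorem pvItem_get? (cs : List Char) (item : String) (d : PySem.Dict Char String) (c : Char) :
    (cs.foldl (fun d c => if d.contains c then d else d.insert c item) d).get? c
      = if (d.get? c).isSome then d.get? c
        else if cs.contains c then some item else none := by
  induction cs generalizing d with
  | nil => simp
  | cons c' rest ih =>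
    simp only [List.foldl_cons]
    rw [ih]
    by_cases hc : d.contains c' = true
    · have hs : (d.get? c').isSome := by
        rw [PySem.Dict.contains_eq_isSome_get?] at hc; exact hc
      simp only [hc, if_true]
      by_cases h : (d.get? c).isSome
      · simp [h]
      · have hne : ¬ (c = c') := by
          intro h'; subst h'; exact h hs
        simp [h, hne]
    · simp only [hc, Bool.false_eq_true, if_false]
      rw [PySem.Dict.get?_insert]
      by_cases he : c = c'
      · subst he
        have hn : d.get? c = none := by
          cases h : d.get? c with
          | none => rfl
          | some v =>
            rw [PySem.Dict.contains_eq_isSome_get?, h] at hc; simp at hc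
        simp [hn]
      · simp only [he, if_false]
        by_cases h : (d.get? c).isSome
        · simp [h]
        · simp [h, he]

-- outer loop: table lookup = first item of lst containing c (on top of an accumulator d)
theorem pvTable_get? (lst : List String) (d : PySem.Dict Char String) (c : Char) :
    (lst.foldl (fun d item =>
        item.toList.foldl (fun d c => if d.contains c then d else d.insert c item) d) d).get? c
      = if (d.get? c).isSome then d.get? c
        else lst.find? (fun item => item.toList.contains c) := by
  induction lst generalizing d with
  | nil => simp
  | cons x xs ih =>
    simp only [List.foldl_cons]
    rw [ih, pvItem_get?]
    by_cases h : (d.get? c).isSome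
    · simp [h]
    · simp only [h, if_false, Bool.false_eq_true]
      by_cases hm : c ∈ x.toList <;> simp [hm]

theorem pvFirstTable_get? (lst : List String) (c : Char) :
    (pvFirstTable lst).get? c = lst.find? (fun item => item.toList.contains c) := by
  unfold pvFirstTable
  rw [pvTable_get?]
  simp

-- ===== VERDICT (by name: the statement is the Claim_ definition above) =====
theorem sort_by_letter_spec : Claim_equal_sort_by_letter := by
  intro lst _
  unfold Spec_sort_by_letter sort_by_letter sort_by_letter_alt
  cases lst with
  | nil => decide
  | cons x xs =>
    simp only [List.length_cons, Nat.succ_ne_zero, beq_iff_eq, if_false]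
    congr 1
    funext acc i
    rw [pvFirstTable_get?]
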